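-- pv_equiv track=rewrite | github.com/yellalinghmargonda-photon/python | leet_code500/constrained_sum.py | maxSumRec
-- ===== SOURCE A (Python) =====
-- def maxSumRec(nums, k, i, memo):
--     # Base case: If we have reached the end of the array
--     if i >= len(nums):
--         return 0
--
--     # Check if the result for this index i has already been computed
--     if i in memo:
--         return memo[i]
--
--     # Option 1: Skip the current element and move to the next element
--     skip = maxSumRec(nums, k, i + 1, memo)
--
--     # Option 2: Include the current element in the subsequence
--     include = nums[i]
--
--     # Iterate over all valid indices j in the range [i + 1, i + k], ensuring we do not go beyond array bounds
--     for j in range(i + 1, min(i + k + 1, len(nums))):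
--         include = max(include, nums[i] + maxSumRec(nums, k, j, memo))
--
--     # Store the maximum of both options (skip and include) in the memo dictionary
--     memo[i] = max(skip, include)
--
--     return memo[i]
-- ===== SOURCE B (Python) =====
-- def maxSumRec(nums, k, i, memo):
--     # Bottom-up tabulation (right-to-left) instead of top-down memoized recursion.
--     # Note: unlike A, this does not mutate `memo`; equivalence is about the return value.
--     n = len(nums)
--     if i >= n:
--         return 0
--     if i in memo:
--         return memo[i]
--     size = n - i
--     dp = [0] * (size + 1)          # dp[t] is the value for index i + t; dp[size] = 0 stands for index n
--     for t in range(size):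
--         j = n - 1 - t
--         if j in memo:
--             dp[j - i] = memo[j]
--         else:
--             best = 0
--             for jj in range(j + 1, min(j + k + 1, n)):
--                 v = dp[jj - i]
--                 if v > best:
--                     best = v
--             dp[j - i] = max(dp[j - i + 1], nums[j] + best)
--     return dp[0]
-- ===== Notes on version B (the rewrite author's own statement) =====
-- stated objective: alternative
-- what changed: Top-down memoized recursion (A mutates the memo dict and recurses per index) is replaced by an iterative bottom-up right-to-left DP table with an inner window scan; B does not mutate memo and performs no recursion.
import Mathlib
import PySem

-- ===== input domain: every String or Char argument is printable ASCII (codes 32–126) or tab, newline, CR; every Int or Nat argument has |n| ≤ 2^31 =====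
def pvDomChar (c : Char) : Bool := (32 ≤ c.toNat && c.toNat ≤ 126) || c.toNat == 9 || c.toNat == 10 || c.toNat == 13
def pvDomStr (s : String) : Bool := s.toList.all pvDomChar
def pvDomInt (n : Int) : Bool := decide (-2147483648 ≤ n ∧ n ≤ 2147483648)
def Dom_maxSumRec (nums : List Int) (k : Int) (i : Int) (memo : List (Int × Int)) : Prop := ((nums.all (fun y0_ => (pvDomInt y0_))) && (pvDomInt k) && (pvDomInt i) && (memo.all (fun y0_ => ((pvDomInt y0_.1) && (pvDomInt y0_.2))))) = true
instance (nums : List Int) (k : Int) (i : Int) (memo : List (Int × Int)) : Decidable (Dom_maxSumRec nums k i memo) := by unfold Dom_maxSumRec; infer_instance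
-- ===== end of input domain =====

-- B replaces A's top-down memoized recursion by an iterative bottom-up DP table (return value only:
-- A mutates its memo argument in place, B does not).

-- ===== PORT A =====
-- A's recursion threads the mutated memo dict; fuel (n - i).toNat + 1 bounds the recursion depth
-- (indices strictly increase towards n, so this fuel is never exhausted).
def maxSumRecAux (nums : List Int) (k : Int) (fuel : Nat) (i : Int) (memo : PySem.Dict Int Int) :
    Int × PySem.Dict Int Int :=
  match fuel with
  | 0 => (0, memo)
  | fuel + 1 =>
    if PySem.List.len nums ≤ i then (0, memo)
    else
      match memo.get? i with
      | some v => (v, memo)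
      | none =>
        let sm := maxSumRecAux nums k fuel (i + 1) memo
        let numi := PySem.List.pyGetD nums i 0
        let im := (PySem.List.pyRange (i + 1) (min (i + k + 1) (PySem.List.len nums)) 1).foldl
          (fun st j =>
            let rm := maxSumRecAux nums k fuel j st.2
            (max st.1 (numi + rm.1), rm.2))
          (numi, sm.2)
        let res := max sm.1 im.1
        (res, im.2.insert i res)

def maxSumRec (nums : List Int) (k : Int) (i : Int) (memo : List (Int × Int)) : Int :=
  (maxSumRecAux nums k ((PySem.List.len nums - i).toNat + 1) i (PySem.Dict.mk memo)).1

-- ===== PORT B =====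
def maxSumRec_alt (nums : List Int) (k : Int) (i : Int) (memo : List (Int × Int)) : Int :=
  let n := PySem.List.len nums
  if n ≤ i then 0
  else
    match (PySem.Dict.mk memo).get? i with
    | some v => v
    | none =>
      let size := (n - i).toNat
      let dp0 : List Int := List.replicate (size + 1) 0
      let dp := (PySem.List.pyRange 0 (size : Int) 1).foldl
        (fun dp t =>
          let j := n - 1 - t
          match (PySem.Dict.mk memo).get? j with
          | some v => PySem.List.pySetD dp (j - i) v
          | none =>
            let best := (PySem.List.pyRange (j + 1) (min (j + k + 1) n) 1).foldl
              (fun best jj =>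
                let v := PySem.List.pyGetD dp (jj - i) 0
                if best < v then v else best) 0
            PySem.List.pySetD dp (j - i)
              (max (PySem.List.pyGetD dp (j - i + 1) 0) (PySem.List.pyGetD nums j 0 + best)))
        dp0
      PySem.List.pyGetD dp 0 0

-- ===== PRECONDITION & SPEC =====
-- Pre_ excludes exactly the inputs on which A raises IndexError (i below -len(nums), not memoized):
-- there nums[i] / a deeper nums[j] is out of range; B raises there as well.
def Pre_maxSumRec (nums : List Int) (k : Int) (i : Int) (memo : List (Int × Int)) : Prop :=
  -(PySem.List.len nums) ≤ i ∨ (PySem.Dict.mk memo).contains i = true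
instance (nums : List Int) (k : Int) (i : Int) (memo : List (Int × Int)) : Decidable (Pre_maxSumRec nums k i memo) := by unfold Pre_maxSumRec; infer_instance
def pvWitness_maxSumRec : List Int × Int × Int × (List (Int × Int)) := ([3, -1, 4], 2, 0, [])

def Spec_maxSumRec (nums : List Int) (k : Int) (i : Int) (memo : List (Int × Int)) (out : Int) : Prop := out = maxSumRec_alt nums k i memo
instance (nums : List Int) (k : Int) (i : Int) (memo : List (Int × Int)) (out : Int) : Decidable (Spec_maxSumRec nums k i memo out) := by unfold Spec_maxSumRec; infer_instance

-- ===== CLAIM (what is proved, stated in full; the proofs are below) =====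
def Claim_equal_maxSumRec : Prop := ∀ (nums : List Int) (k : Int) (i : Int) (memo : List (Int × Int)), Dom_maxSumRec nums k i memo → Pre_maxSumRec nums k i memo → Spec_maxSumRec nums k i memo (maxSumRec nums k i memo)

-- ===== LEMMAS AND PROOFS =====

-- The common mathematical recurrence both programs compute, with fuel.
def pvG (nums : List Int) (k : Int) (memo : List (Int × Int)) : Nat → Int → Int
  | 0, _ => 0
  | fuel + 1, j =>
    if PySem.List.len nums ≤ j then 0
    else
      match (PySem.Dict.mk memo).get? j with
      | some v => v
      | none =>
        let w := (PySem.List.pyRange (j + 1) (min (j + k + 1) (PySem.List.len nums)) 1).foldl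
          (fun b j' => max b (pvG nums k memo fuel j')) 0
        max (pvG nums k memo fuel (j + 1)) (PySem.List.pyGetD nums j 0 + w)

-- canonical (fuel-sufficient) value
def pvGC (nums : List Int) (k : Int) (memo : List (Int × Int)) (j : Int) : Int :=
  pvG nums k memo ((PySem.List.len nums - j).toNat + 1) j

lemma pvG_stable (nums : List Int) (k : Int) (memo : List (Int × Int)) :
    ∀ f1 f2 j, (PySem.List.len nums - j).toNat < f1 → (PySem.List.len nums - j).toNat < f2 →
      pvG nums k memo f1 j = pvG nums k memo f2 j := by
  intro f1
  induction f1 with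
  | zero => intro f2 j h1 h2; omega
  | succ f1 ih =>
    intro f2 j h1 h2
    cases f2 with
    | zero => omega
    | succ f2 =>
      simp only [pvG]
      by_cases hj : PySem.List.len nums ≤ j
      · rw [if_pos hj, if_pos hj]
      · rw [if_neg hj, if_neg hj]
        have hjlt : j < (nums.length : Int) := by simpa using not_le.mp hj
        have hlen : PySem.List.len nums = (nums.length : Int) := by simp
        cases hmem : (PySem.Dict.mk memo).get? j with
        | some v => rfl
        | none =>
          simp only
          have hskip : pvG nums k memo f1 (j + 1) = pvG nums k memo f2 (j + 1) := by
            apply ih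
            · rw [hlen] at h1 ⊢; omega
            · rw [hlen] at h2 ⊢; omega
          have hfold :
              (PySem.List.pyRange (j + 1) (min (j + k + 1) (PySem.List.len nums)) 1).foldl
                (fun b j' => max b (pvG nums k memo f1 j')) 0 =
              (PySem.List.pyRange (j + 1) (min (j + k + 1) (PySem.List.len nums)) 1).foldl
                (fun b j' => max b (pvG nums k memo f2 j')) 0 := by
            apply PySem.List.foldl_congr_mem
            intro acc x hx
            rw [PySem.List.mem_pyRange_one] at hx
            have hx2 : x < (nums.length : Int) := by
              have := hx.2; rw [hlen] at this; omega
            congr 1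
            apply ih
            · rw [hlen] at h1 ⊢; omega
            · rw [hlen] at h2 ⊢; omega
          rw [hskip, hfold]

lemma pvGC_eq (nums : List Int) (k : Int) (memo : List (Int × Int)) (f : Nat) (j : Int)
    (h : (PySem.List.len nums - j).toNat < f) :
    pvG nums k memo f j = pvGC nums k memo j := by
  exact pvG_stable nums k memo f _ j h (by omega)

lemma pvGC_base (nums : List Int) (k : Int) (memo : List (Int × Int)) (j : Int)
    (h : PySem.List.len nums ≤ j) : pvGC nums k memo j = 0 := by
  have h' : (nums.length : Int) ≤ j := by simpa using h
  simp only [pvGC, pvG]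
  rw [if_pos (by simpa using h')]

lemma pvGC_memo (nums : List Int) (k : Int) (memo : List (Int × Int)) (j : Int) (v : Int)
    (hj : j < PySem.List.len nums) (hm : (PySem.Dict.mk memo).get? j = some v) :
    pvGC nums k memo j = v := by
  simp only [pvGC, pvG]
  rw [if_neg (by simpa using not_le.mpr hj), hm]

lemma pvGC_step (nums : List Int) (k : Int) (memo : List (Int × Int)) (j : Int)
    (hj : j < PySem.List.len nums) (hm : (PySem.Dict.mk memo).get? j = none) :
    pvGC nums k memo j =
      max (pvGC nums k memo (j + 1))
        (PySem.List.pyGetD nums j 0 +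
          (PySem.List.pyRange (j + 1) (min (j + k + 1) (PySem.List.len nums)) 1).foldl
            (fun b j' => max b (pvGC nums k memo j')) 0) := by
  have hlen : PySem.List.len nums = (nums.length : Int) := by simp
  have hjlt : j < (nums.length : Int) := by rw [hlen] at hj; exact hj
  conv_lhs => rw [pvGC]
  simp only [pvG]
  rw [if_neg (not_le.mpr hj), hm]
  simp only
  congr 1
  · apply pvGC_eq
    rw [hlen]; omega
  · congr 1
    apply PySem.List.foldl_congr_mem
    intro acc x hx
    rw [PySem.List.mem_pyRange_one] at hx
    have hx2 : x < (nums.length : Int) := by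
      have := hx.2; rw [hlen] at this; omega
    congr 1
    apply pvGC_eq
    rw [hlen]; omega

lemma foldl_max_add (c : Int) (h : Int → Int) :
    ∀ (l : List Int) (b : Int),
      l.foldl (fun a j => max a (c + h j)) (c + b) = c + l.foldl (fun a j => max a (h j)) b := by
  intro l
  induction l with
  | nil => intro b; rfl
  | cons x xs ih =>
    intro b
    simp only [List.foldl_cons]
    rw [show max (c + b) (c + h x) = c + max b (h x) by omega]
    exact ih _

-- A-side inner loop: folding A's window loop preserves the memo invariants and
-- accumulates max over canonical values.
lemma foldA (nums : List Int) (k : Int) (memo : List (Int × Int)) (fuel : Nat) (c : Int)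
    (haux : ∀ (i : Int) (m : PySem.Dict Int Int),
      (PySem.List.len nums - i).toNat < fuel →
      (∀ j v, (PySem.Dict.mk memo).get? j = some v → m.get? j = some v) →
      (∀ j v, m.get? j = some v → j < PySem.List.len nums → v = pvGC nums k memo j) →
      (maxSumRecAux nums k fuel i m).1 = pvGC nums k memo i ∧
      (∀ j v, (PySem.Dict.mk memo).get? j = some v → (maxSumRecAux nums k fuel i m).2.get? j = some v) ∧
      (∀ j v, (maxSumRecAux nums k fuel i m).2.get? j = some v → j < PySem.List.len nums → v = pvGC nums k memo j)) :
    ∀ (l : List Int), (∀ j ∈ l, (PySem.List.len nums - j).toNat < fuel) →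
    ∀ (acc : Int) (m : PySem.Dict Int Int),
      (∀ j v, (PySem.Dict.mk memo).get? j = some v → m.get? j = some v) →
      (∀ j v, m.get? j = some v → j < PySem.List.len nums → v = pvGC nums k memo j) →
      (l.foldl (fun st j => (max st.1 (c + (maxSumRecAux nums k fuel j st.2).1), (maxSumRecAux nums k fuel j st.2).2)) (acc, m)).1
        = l.foldl (fun a j => max a (c + pvGC nums k memo j)) acc ∧
      (∀ j v, (PySem.Dict.mk memo).get? j = some v → (l.foldl (fun st j => (max st.1 (c + (maxSumRecAux nums k fuel j st.2).1), (maxSumRecAux nums k fuel j st.2).2)) (acc, m)).2.get? j = some v) ∧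
      (∀ j v, (l.foldl (fun st j => (max st.1 (c + (maxSumRecAux nums k fuel j st.2).1), (maxSumRecAux nums k fuel j st.2).2)) (acc, m)).2.get? j = some v → j < PySem.List.len nums → v = pvGC nums k memo j) := by
  intro l
  induction l with
  | nil => intro _ acc m h1 h2; exact ⟨rfl, h1, h2⟩
  | cons x xs ih =>
    intro hl acc m h1 h2
    obtain ⟨e1, e2, e3⟩ := haux x m (hl x (by simp)) h1 h2
    simp only [List.foldl_cons]
    obtain ⟨r1, r2, r3⟩ := ih (fun j hj => hl j (by simp [hj]))
      (max acc (c + (maxSumRecAux nums k fuel x m).1)) (maxSumRecAux nums k fuel x m).2 e2 e3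
    refine ⟨?_, r2, r3⟩
    rw [r1, e1]

-- A-side: the threaded memo always contains only canonical values (for keys < n)
-- and extends the initial memo; then aux returns the canonical value.
lemma auxOK (nums : List Int) (k : Int) (memo : List (Int × Int)) :
    ∀ (fuel : Nat) (i : Int) (m : PySem.Dict Int Int),
      (PySem.List.len nums - i).toNat < fuel →
      (∀ j v, (PySem.Dict.mk memo).get? j = some v → m.get? j = some v) →
      (∀ j v, m.get? j = some v → j < PySem.List.len nums → v = pvGC nums k memo j) →
      (maxSumRecAux nums k fuel i m).1 = pvGC nums k memo i ∧
      (∀ j v, (PySem.Dict.mk memo).get? j = some v → (maxSumRecAux nums k fuel i m).2.get? j = some v) ∧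
      (∀ j v, (maxSumRecAux nums k fuel i m).2.get? j = some v → j < PySem.List.len nums → v = pvGC nums k memo j) := by
  intro fuel
  induction fuel with
  | zero => intro i m hf h1 h2; omega
  | succ fuel ih =>
    intro i m hf h1 h2
    have hlen : PySem.List.len nums = (nums.length : Int) := by simp
    by_cases hi : PySem.List.len nums ≤ i
    · simp only [maxSumRecAux, if_pos hi]
      exact ⟨(pvGC_base nums k memo i hi).symm, h1, h2⟩
    · have hilt : i < PySem.List.len nums := not_le.mp hi
      cases hmem : m.get? i with
      | some v =>
        simp only [maxSumRecAux, if_neg hi, hmem]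
        exact ⟨h2 i v hmem hilt, h1, h2⟩
      | none =>
        have hm0 : (PySem.Dict.mk memo).get? i = none := by
          cases hg : (PySem.Dict.mk memo).get? i with
          | none => rfl
          | some w => exact absurd (h1 i w hg) (by simp [hmem])
        obtain ⟨hs1, hs2, hs3⟩ := ih (i + 1) m (by rw [hlen] at hf hilt ⊢; omega) h1 h2
        obtain ⟨hf1, hf2, hf3⟩ := foldA nums k memo fuel (PySem.List.pyGetD nums i 0)
            (fun i' m' a b c' => ih i' m' a b c')
            (PySem.List.pyRange (i + 1) (min (i + k + 1) (PySem.List.len nums)) 1)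
            (by intro j hj
                rw [PySem.List.mem_pyRange_one] at hj
                have hjlt : j < (nums.length : Int) := by
                  have := hj.2; rw [hlen] at this; omega
                rw [hlen] at hf hilt ⊢
                omega)
            (PySem.List.pyGetD nums i 0) (maxSumRecAux nums k fuel (i + 1) m).2 hs2 hs3
        have hW : (PySem.List.pyRange (i + 1) (min (i + k + 1) (PySem.List.len nums)) 1).foldl
              (fun a j => max a (PySem.List.pyGetD nums i 0 + pvGC nums k memo j))
              (PySem.List.pyGetD nums i 0)
            = PySem.List.pyGetD nums i 0 +
              (PySem.List.pyRange (i + 1) (min (i + k + 1) (PySem.List.len nums)) 1).foldl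
                (fun b j' => max b (pvGC nums k memo j')) 0 := by
          have h0 := foldl_max_add (PySem.List.pyGetD nums i 0) (pvGC nums k memo)
            (PySem.List.pyRange (i + 1) (min (i + k + 1) (PySem.List.len nums)) 1) 0
          rw [add_zero] at h0
          exact h0
        have hres :
            max (maxSumRecAux nums k fuel (i + 1) m).1
              ((PySem.List.pyRange (i + 1) (min (i + k + 1) (PySem.List.len nums)) 1).foldl
                (fun st j => (max st.1 (PySem.List.pyGetD nums i 0 + (maxSumRecAux nums k fuel j st.2).1), (maxSumRecAux nums k fuel j st.2).2))
                (PySem.List.pyGetD nums i 0, (maxSumRecAux nums k fuel (i + 1) m).2)).1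
            = pvGC nums k memo i := by
          rw [hf1, hs1, hW, pvGC_step nums k memo i hilt hm0]
        simp only [maxSumRecAux, if_neg hi, hmem]
        refine ⟨hres, ?_, ?_⟩
        · intro j v hjv
          rw [PySem.Dict.get?_insert]
          split
          · next hji => exfalso; rw [hji] at hjv; rw [hjv] at hm0; cases hm0
          · exact hf2 j v hjv
        · intro j v hjv hjlt
          rw [PySem.Dict.get?_insert] at hjv
          split at hjv
          · next hji =>
            cases hjv
            rw [hji, ← hres]
          · exact hf3 j v hjv hjlt

lemma portA_eq_pvGC (nums : List Int) (k : Int) (i : Int) (memo : List (Int × Int)) :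
    maxSumRec nums k i memo = pvGC nums k memo i := by
  have := auxOK nums k memo ((PySem.List.len nums - i).toNat + 1) i (PySem.Dict.mk memo)
    (by omega) (fun _ _ h => h)
    (fun j v hjv hjlt => (pvGC_memo nums k memo j v hjlt hjv).symm)
  exact this.1

-- B-side (proof helper): the loop body of port B, named.
def pvStepB (nums : List Int) (k : Int) (memo : List (Int × Int)) (i : Int)
    (dp : List Int) (t : Int) : List Int :=
  match (PySem.Dict.mk memo).get? (PySem.List.len nums - 1 - t) with
  | some v => PySem.List.pySetD dp (PySem.List.len nums - 1 - t - i) v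
  | none =>
    PySem.List.pySetD dp (PySem.List.len nums - 1 - t - i)
      (max (PySem.List.pyGetD dp (PySem.List.len nums - 1 - t - i + 1) 0)
        (PySem.List.pyGetD nums (PySem.List.len nums - 1 - t) 0 +
          (PySem.List.pyRange (PySem.List.len nums - 1 - t + 1)
              (min (PySem.List.len nums - 1 - t + k + 1) (PySem.List.len nums)) 1).foldl
            (fun best jj =>
              if best < PySem.List.pyGetD dp (jj - i) 0 then PySem.List.pyGetD dp (jj - i) 0
              else best) 0))

lemma pv_getD_set_ne (xs : List Int) (a p : Nat) (v : Int) (h : a ≠ p) :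
    (xs.set a v).getD p 0 = xs.getD p 0 := by
  simp [List.getD_eq_getElem?_getD, h]

lemma pv_getD_set_self (xs : List Int) (a : Nat) (v : Int) (h : a < xs.length) :
    (xs.set a v).getD a 0 = v := by
  simp [List.getD_eq_getElem?_getD, h]

-- B-side: the dp table, filled right to left, holds canonical values on filled positions.
lemma altLoop (nums : List Int) (k : Int) (memo : List (Int × Int)) (i : Int)
    (hi : i < PySem.List.len nums) :
    ∀ t : Nat, t ≤ (PySem.List.len nums - i).toNat →
      ((PySem.List.pyRange 0 (t : Int) 1).foldl (pvStepB nums k memo i)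
        (List.replicate ((PySem.List.len nums - i).toNat + 1) 0)).length
        = (PySem.List.len nums - i).toNat + 1 ∧
      ∀ p : Nat, (PySem.List.len nums - i).toNat - t ≤ p →
        p ≤ (PySem.List.len nums - i).toNat →
        ((PySem.List.pyRange 0 (t : Int) 1).foldl (pvStepB nums k memo i)
          (List.replicate ((PySem.List.len nums - i).toNat + 1) 0)).getD p 0
          = pvGC nums k memo (i + (p : Int)) := by
  have hlen : PySem.List.len nums = (nums.length : Int) := by simp
  rw [hlen] at hi
  intro t
  induction t with
  | zero =>
    intro _
    constructor
    · simp [PySem.List.pyRange_one_eq_nil]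
    · intro p hp1 hp2
      have hp : p = ((nums.length : Int) - i).toNat := by omega
      rw [PySem.List.pyRange_one_eq_nil (by norm_num)]
      simp only [List.foldl_nil]
      rw [hlen, hp]
      have hval : List.getD (List.replicate (((nums.length : Int) - i).toNat + 1) (0 : Int))
          (((nums.length : Int) - i).toNat) 0 = 0 := by
        simp [List.getD_eq_getElem?_getD]
      rw [hval]
      refine (pvGC_base nums k memo _ ?_).symm
      rw [hlen]
      omega
  | succ t ih =>
    intro ht
    obtain ⟨ihlen, ihget⟩ := ih (by omega)
    have hsplit : PySem.List.pyRange 0 ((t + 1 : Nat) : Int) 1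
        = PySem.List.pyRange 0 (t : Nat) 1 ++ [(t : Int)] := by
      push_cast
      exact PySem.List.pyRange_one_succ_right (by positivity)
    rw [hsplit, List.foldl_append, List.foldl_cons, List.foldl_nil]
    -- abbreviations
    have hji : (0 : Int) ≤ PySem.List.len nums - 1 - (t : Int) - i := by rw [hlen]; omega
    have hjnat : (PySem.List.len nums - 1 - (t : Int) - i).toNat
        = ((nums.length : Int) - i).toNat - 1 - t := by rw [hlen]; omega
    have hjlt : PySem.List.len nums - 1 - (t : Int) < PySem.List.len nums := by rw [hlen]; omega
    have hposlt : ((nums.length : Int) - i).toNat - 1 - t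
        < (List.replicate (((nums.length : Int) - i).toNat + 1) (0 : Int)).length := by
      simp; omega
    -- the value written at position size - 1 - t is the canonical value of index n-1-t
    have hwrite : ∀ w : Int,
        w = pvGC nums k memo (PySem.List.len nums - 1 - (t : Int)) →
        ∀ p : Nat, ((nums.length : Int) - i).toNat - (t + 1) ≤ p →
          p ≤ ((nums.length : Int) - i).toNat →
        (PySem.List.pySetD ((PySem.List.pyRange 0 (t : Nat) 1).foldl (pvStepB nums k memo i)
            (List.replicate ((PySem.List.len nums - i).toNat + 1) 0))
            (PySem.List.len nums - 1 - (t : Int) - i) w).getD p 0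
          = pvGC nums k memo (i + (p : Int)) := by
      intro w hw p hp1 hp2
      rw [PySem.List.pySetD_of_nonneg _ _ hji, hjnat]
      by_cases hp : p = ((nums.length : Int) - i).toNat - 1 - t
      · rw [← hp]
        rw [pv_getD_set_self _ _ _ (by rw [ihlen, hlen]; omega)]
        rw [hw]
        congr 1
        rw [hlen]
        omega
      · rw [pv_getD_set_ne _ _ _ _ (by omega)]
        exact ihget p (by omega) hp2
    cases hmem2 : (PySem.Dict.mk memo).get? (PySem.List.len nums - 1 - (t : Int)) with
    | some v =>
      constructor
      · simp only [pvStepB, hmem2]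
        rw [PySem.List.pySetD_of_nonneg _ _ hji, List.length_set, ihlen]
      · intro p hp1 hp2
        simp only [pvStepB, hmem2]
        refine hwrite v ?_ p (by rw [hlen] at hp1; omega) (by rw [hlen] at hp2; omega)
        exact (pvGC_memo nums k memo _ v (by rw [hlen]; omega) hmem2).symm
    | none =>
      constructor
      · simp only [pvStepB, hmem2]
        rw [PySem.List.pySetD_of_nonneg _ _ hji, List.length_set, ihlen]
      · intro p hp1 hp2
        simp only [pvStepB, hmem2]
        refine hwrite _ ?_ p (by rw [hlen] at hp1; omega) (by rw [hlen] at hp2; omega)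
        -- the computed value equals the canonical recurrence at index n-1-t
        have hskip : PySem.List.pyGetD
            ((PySem.List.pyRange 0 (t : Nat) 1).foldl (pvStepB nums k memo i)
              (List.replicate ((PySem.List.len nums - i).toNat + 1) 0))
            (PySem.List.len nums - 1 - (t : Int) - i + 1) 0
            = pvGC nums k memo (PySem.List.len nums - 1 - (t : Int) + 1) := by
          rw [PySem.List.pyGetD_of_nonneg _ _ (by rw [hlen]; omega)]
          have hidx : (PySem.List.len nums - 1 - (t : Int) - i + 1).toNat
              = ((nums.length : Int) - i).toNat - t := by rw [hlen]; omega
          rw [hidx, ihget _ (by omega) (by rw [hlen]; omega)]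
          congr 1
          rw [hlen]
          omega
        have hbest : (PySem.List.pyRange (PySem.List.len nums - 1 - (t : Int) + 1)
              (min (PySem.List.len nums - 1 - (t : Int) + k + 1) (PySem.List.len nums)) 1).foldl
            (fun best jj =>
              if best < PySem.List.pyGetD
                  ((PySem.List.pyRange 0 (t : Nat) 1).foldl (pvStepB nums k memo i)
                    (List.replicate ((PySem.List.len nums - i).toNat + 1) 0)) (jj - i) 0
              then PySem.List.pyGetD
                  ((PySem.List.pyRange 0 (t : Nat) 1).foldl (pvStepB nums k memo i)
                    (List.replicate ((PySem.List.len nums - i).toNat + 1) 0)) (jj - i) 0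
              else best) 0
            = (PySem.List.pyRange (PySem.List.len nums - 1 - (t : Int) + 1)
                (min (PySem.List.len nums - 1 - (t : Int) + k + 1) (PySem.List.len nums)) 1).foldl
              (fun b j' => max b (pvGC nums k memo j')) 0 := by
          apply PySem.List.foldl_congr_mem
          intro acc jj hjj
          rw [PySem.List.mem_pyRange_one] at hjj
          have hjj1 : PySem.List.len nums - 1 - (t : Int) + 1 ≤ jj := hjj.1
          have hjj2 : jj < (nums.length : Int) := by
            have := hjj.2
            rw [hlen] at this
            omega
          rw [hlen] at hjj1
          have hval : PySem.List.pyGetD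
              ((PySem.List.pyRange 0 (t : Nat) 1).foldl (pvStepB nums k memo i)
                (List.replicate ((PySem.List.len nums - i).toNat + 1) 0)) (jj - i) 0
              = pvGC nums k memo jj := by
            rw [PySem.List.pyGetD_of_nonneg _ _ (by omega)]
            rw [ihget (jj - i).toNat (by rw [hlen]; omega) (by rw [hlen]; omega)]
            congr 1
            omega
          rw [hval]
          omega
        rw [hskip, hbest]
        exact (pvGC_step nums k memo _ hjlt hmem2).symm

lemma portB_eq_pvGC (nums : List Int) (k : Int) (i : Int) (memo : List (Int × Int)) :
    maxSumRec_alt nums k i memo = pvGC nums k memo i := by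
  have hlen : PySem.List.len nums = (nums.length : Int) := by simp
  by_cases hi : PySem.List.len nums ≤ i
  · simp only [maxSumRec_alt]
    rw [if_pos hi]
    exact (pvGC_base nums k memo i hi).symm
  · have hilt : i < PySem.List.len nums := not_le.mp hi
    cases hmem : (PySem.Dict.mk memo).get? i with
    | some v =>
      simp only [maxSumRec_alt, hmem]
      rw [if_neg hi]
      exact (pvGC_memo nums k memo i v hilt hmem).symm
    | none =>
      simp only [maxSumRec_alt, hmem]
      rw [if_neg hi]
      show PySem.List.pyGetD ((PySem.List.pyRange 0 (((PySem.List.len nums - i).toNat : Nat) : Int) 1).foldl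
        (pvStepB nums k memo i)
        (List.replicate ((PySem.List.len nums - i).toNat + 1) 0)) 0 0 = pvGC nums k memo i
      obtain ⟨_, hget⟩ := altLoop nums k memo i hilt ((PySem.List.len nums - i).toNat) le_rfl
      rw [PySem.List.pyGetD_zero]
      have h0 := hget 0 (by omega) (by omega)
      rw [List.getD_eq_getElem?_getD] at h0 ⊢
      simpa using h0

-- ===== VERDICT (by name: the statement is the Claim_ definition above) =====
theorem maxSumRec_spec : Claim_equal_maxSumRec := by
  intro nums k i memo _ _
  unfold Spec_maxSumRec
  rw [portA_eq_pvGC, portB_eq_pvGC]
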